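-- pv_equiv track=rewrite | github.com/moustafattia/yoyopod-core | yoyopod_cli/pi/support/voice_commands.py | _trim_slot_tokens
-- ===== SOURCE A (Python) =====
-- _SLOT_FILLER_TOKENS = frozenset({"a", "an", "the", "to", "for", "my", "please", "now"})
--
-- def _trim_slot_tokens(tokens: tuple[str, ...]) -> tuple[str, ...]:
--     """Trim filler tokens around a slot extracted from the transcript."""
--
--     start = 0
--     end = len(tokens)
--     while start < end and tokens[start] in _SLOT_FILLER_TOKENS:
--         start += 1
--     while end > start and tokens[end - 1] in _SLOT_FILLER_TOKENS:
--         end -= 1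
--     return tokens[start:end]
-- ===== SOURCE B (Python) =====
-- _SLOT_FILLER_TOKENS = frozenset({"a", "an", "the", "to", "for", "my", "please", "now"})
--
-- def _trim_slot_tokens(tokens):
--     """Trim filler tokens around a slot extracted from the transcript."""
--     keep = [i for i, t in enumerate(tokens) if t not in _SLOT_FILLER_TOKENS]
--     if not keep:
--         return ()
--     return tokens[keep[0]:keep[-1] + 1]
-- ===== Notes on version B (the rewrite author's own statement) =====
-- stated objective: alternative
-- what changed: Replaces the two early-stopping boundary-pointer loops with a single full enumerate pass collecting the indices of non-filler tokens, returning one slice from the first to the last kept index.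
import Mathlib
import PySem

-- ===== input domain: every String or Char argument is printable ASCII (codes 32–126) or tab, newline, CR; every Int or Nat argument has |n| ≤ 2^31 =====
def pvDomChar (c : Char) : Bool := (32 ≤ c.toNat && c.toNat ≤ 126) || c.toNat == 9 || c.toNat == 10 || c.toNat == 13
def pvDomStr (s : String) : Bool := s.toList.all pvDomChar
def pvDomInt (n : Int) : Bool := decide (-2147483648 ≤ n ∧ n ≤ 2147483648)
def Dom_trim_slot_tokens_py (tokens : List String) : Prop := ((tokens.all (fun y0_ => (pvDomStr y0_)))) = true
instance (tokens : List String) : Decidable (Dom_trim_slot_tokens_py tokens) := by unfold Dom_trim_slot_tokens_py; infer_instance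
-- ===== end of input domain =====

-- B replaces the two boundary-pointer trim loops with one enumerate pass collecting kept indices plus a single slice (alternative decomposition, same cost).

-- ===== PORT A =====
def pvFillers : List String := ["a", "an", "the", "to", "for", "my", "please", "now"]

-- first while loop: advance start over leading fillers
def pvTrimStartLoop (tokens : List String) (start stop : Nat) : Nat :=
  if h : start < stop ∧ pvFillers.contains (tokens.getD start "") then
    pvTrimStartLoop tokens (start + 1) stop
  else start
termination_by stop - start
decreasing_by omega

-- second while loop: retreat end over trailing fillers
def pvTrimEndLoop (tokens : List String) (end_ start : Nat) : Nat :=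
  if h : start < end_ ∧ pvFillers.contains (tokens.getD (end_ - 1) "") then
    pvTrimEndLoop tokens (end_ - 1) start
  else end_
termination_by end_
decreasing_by omega

def trim_slot_tokens_py (tokens : List String) : List String :=
  let start := pvTrimStartLoop tokens 0 tokens.length
  let end_ := pvTrimEndLoop tokens tokens.length start
  PySem.List.slice tokens (some (start : Int)) (some (end_ : Int))

-- ===== PORT B =====
def trim_slot_tokens_py_alt (tokens : List String) : List String :=
  let keep := ((PySem.List.enumerate tokens 0).filter
      (fun p => !pvFillers.contains p.2)).map (·.1)
  match h : keep with
  | [] => []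
  | i :: rest => PySem.List.slice tokens (some i) (some ((i :: rest).getLast (by simp) + 1))

-- ===== PRECONDITION & SPEC =====
def Spec_trim_slot_tokens_py (tokens : List String) (out : List String) : Prop := out = trim_slot_tokens_py_alt tokens
instance (tokens : List String) (out : List String) : Decidable (Spec_trim_slot_tokens_py tokens out) := by unfold Spec_trim_slot_tokens_py; infer_instance

-- ===== CLAIM (what is proved, stated in full; the proofs are below) =====
def Claim_equal_trim_slot_tokens_py : Prop := ∀ (tokens : List String), Dom_trim_slot_tokens_py tokens → Spec_trim_slot_tokens_py tokens (trim_slot_tokens_py tokens)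

-- ===== LEMMAS AND PROOFS =====

-- proof-side abbreviation for the filler test
def pvF (t : String) : Bool := pvFillers.contains t

theorem pvF_true_of {x : String} (h : pvFillers.contains x = true) : pvF x = true := h
theorem pvF_false_of {x : String} (h : pvFillers.contains x = false) : ¬ pvF x = true := by
  unfold pvF
  rw [h]
  simp

-- spec of B's kept-index list, by structural recursion with an offset
def pvKeepAux (n : Int) : List String → List Int
  | [] => []
  | x :: xs => if pvF x then pvKeepAux (n + 1) xs else n :: pvKeepAux (n + 1) xs

theorem pvKeep_eq (t : List String) (n : Int) :
    ((PySem.List.enumerate t n).filter (fun p => !pvFillers.contains p.2)).map (·.1)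
      = pvKeepAux n t := by
  induction t generalizing n with
  | nil => simp [PySem.List.enumerate_nil, pvKeepAux]
  | cons x xs ih =>
    have ih' := ih (n + 1)
    simp only [PySem.List.enumerate_cons, List.filter_cons, pvKeepAux, pvF]
    by_cases hx : x ∈ pvFillers <;> simp [hx] at ih' ⊢ <;> simp [ih']

theorem pvKeepAux_nil_iff (t : List String) (n : Int) :
    pvKeepAux n t = [] ↔ t.all pvF = true := by
  induction t generalizing n with
  | nil => simp [pvKeepAux]
  | cons x xs ih =>
    by_cases hx : pvF x = true <;> simp [pvKeepAux, hx, ih]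

theorem pvKeepAux_head (t : List String) (n : Int) (h : t.all pvF = false) :
    (pvKeepAux n t).head? = some (n + ((t.takeWhile pvF).length : Int)) := by
  induction t generalizing n with
  | nil => simp at h
  | cons x xs ih =>
    by_cases hx : pvF x = true
    · have hxs : xs.all pvF = false := by simpa [hx] using h
      simp only [pvKeepAux, hx, if_true, List.takeWhile_cons_of_pos hx]
      rw [ih (n + 1) hxs]
      simp only [Option.some.injEq, List.length_cons]
      push_cast
      ring
    · simp [pvKeepAux, hx, List.takeWhile_cons_of_neg hx]

theorem pvKeepAux_getLast (t : List String) (n : Int) (h : t.all pvF = false) :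
    (pvKeepAux n t).getLast? = some (n + (t.length : Int) - 1 - ((t.reverse.takeWhile pvF).length : Int)) := by
  induction t generalizing n with
  | nil => simp at h
  | cons x xs ih =>
    by_cases hxs : xs.all pvF = true
    · have hx : pvF x = false := by
        rcases Bool.eq_false_or_eq_true (pvF x) with h1 | h1
        · simp [h1, hxs] at h
        · exact h1
      have hrev : ∀ y ∈ xs.reverse, pvF y = true := by
        intro y hy
        exact (List.all_eq_true.mp hxs) y (List.mem_reverse.mp hy)
      have hnil : pvKeepAux (n + 1) xs = [] := (pvKeepAux_nil_iff xs (n + 1)).mpr hxs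
      have htw : (x :: xs).reverse.takeWhile pvF = xs.reverse := by
        rw [List.reverse_cons, List.takeWhile_append]
        rw [if_pos (by rw [List.takeWhile_eq_self_iff.mpr hrev])]
        rw [List.takeWhile_cons_of_neg (by simp [hx]), List.append_nil]
      simp only [pvKeepAux, hx, Bool.false_eq_true, if_false, hnil, htw]
      simp only [List.getLast?_singleton, List.length_reverse, List.length_cons,
        Option.some.injEq]
      push_cast
      ring
    · have hxs' : xs.all pvF = false := Bool.eq_false_iff.mpr hxs
      have hne : pvKeepAux (n + 1) xs ≠ [] := by
        intro hc
        rw [pvKeepAux_nil_iff] at hc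
        exact hxs hc
      have hlast := ih (n + 1) hxs'
      have htw : (x :: xs).reverse.takeWhile pvF = xs.reverse.takeWhile pvF := by
        rw [List.reverse_cons, List.takeWhile_append]
        rw [if_neg]
        intro hlen
        have hpre := (List.takeWhile_prefix (l := xs.reverse) (p := pvF)).eq_of_length
          (by simpa using hlen)
        have : ∀ y ∈ xs, pvF y = true := by
          intro y hy
          exact List.takeWhile_eq_self_iff.mp hpre y (List.mem_reverse.mpr hy)
        exact hxs (List.all_eq_true.mpr this)
      by_cases hx : pvF x = true
      · simp only [pvKeepAux, hx, if_true, htw]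
        rw [hlast]
        simp only [Option.some.injEq, List.length_cons]
        push_cast
        ring
      · simp only [pvKeepAux, hx, Bool.false_eq_true, if_false, htw,
          List.getLast?_cons, hlast]
        simp only [Option.getD_some, Option.some.injEq, List.length_cons]
        push_cast
        ring

-- characterisation of A's first loop
theorem pvStartLoop_eq (t : List String) (s : Nat) :
    pvTrimStartLoop t s t.length = s + ((t.drop s).takeWhile pvF).length := by
  fun_induction pvTrimStartLoop t s t.length with
  | case1 s h ih =>
    obtain ⟨hlt, hf⟩ := h
    have hdrop : t.drop s = t.getD s "" :: t.drop (s + 1) := by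
      rw [List.drop_eq_getElem_cons hlt]
      simp [List.getD_eq_getElem?_getD, List.getElem?_eq_getElem hlt]
    rw [hdrop, List.takeWhile_cons_of_pos (pvF_true_of hf), ih]
    simp only [List.length_cons]
    omega
  | case2 s h =>
    by_cases hlt : s < t.length
    · have hf : pvFillers.contains (t.getD s "") = false := by
        rcases Bool.eq_false_or_eq_true (pvFillers.contains (t.getD s "")) with h1 | h1
        · exact absurd ⟨hlt, h1⟩ h
        · exact h1
      have hdrop : t.drop s = t.getD s "" :: t.drop (s + 1) := by
        rw [List.drop_eq_getElem_cons hlt]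
        simp [List.getD_eq_getElem?_getD, List.getElem?_eq_getElem hlt]
      rw [hdrop, List.takeWhile_cons_of_neg (pvF_false_of hf)]
      simp
    · rw [List.drop_eq_nil_of_le (by omega)]
      simp

theorem pvTakeRev (t : List String) (e : Nat) (h1 : 0 < e) (h2 : e ≤ t.length) :
    (t.take e).reverse = t.getD (e - 1) "" :: (t.take (e - 1)).reverse := by
  obtain ⟨e', rfl⟩ : ∃ e', e = e' + 1 := ⟨e - 1, by omega⟩
  rw [List.take_add_one]
  simp [List.getD_eq_getElem?_getD, List.getElem?_eq_getElem (by omega : e' < t.length)]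

-- characterisation of A's second loop, given a non-filler sentinel at index s
theorem pvEndLoop_eq (t : List String) (e s : Nat) (hse : s < e) (hel : e ≤ t.length)
    (hs : pvFillers.contains (t.getD s "") = false) :
    pvTrimEndLoop t e s = e - (((t.take e).reverse).takeWhile pvF).length := by
  fun_induction pvTrimEndLoop t e s with
  | case1 e h ih =>
    obtain ⟨hlt, hf⟩ := h
    have hne : s ≠ e - 1 := by
      intro hc
      have : pvFillers.contains (t.getD s "") = true := by rw [hc]; exact hf
      rw [hs] at this
      exact absurd this (by simp)
    have hse' : s < e - 1 := by omega
    rw [pvTakeRev t e (by omega) hel, List.takeWhile_cons_of_pos (pvF_true_of hf)]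
    have hlen : ((t.take (e - 1)).reverse.takeWhile pvF).length ≤ e - 1 := by
      have h3 := (List.takeWhile_prefix (l := (t.take (e - 1)).reverse) (p := pvF)).length_le
      simp only [List.length_reverse, List.length_take] at h3
      omega
    rw [ih hse' (by omega)]
    simp only [List.length_cons]
    omega
  | case2 e h =>
    have hf : pvFillers.contains (t.getD (e - 1) "") = false := by
      rcases Bool.eq_false_or_eq_true (pvFillers.contains (t.getD (e - 1) "")) with h1 | h1
      · exact absurd ⟨hse, h1⟩ h
      · exact h1
    rw [pvTakeRev t e (by omega) hel, List.takeWhile_cons_of_neg (pvF_false_of hf)]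
    simp

-- first non-filler index: position and value
theorem pvFirstNonF (t : List String) (h : t.all pvF = false) :
    (t.takeWhile pvF).length < t.length ∧
      pvFillers.contains (t.getD (t.takeWhile pvF).length "") = false := by
  induction t with
  | nil => simp at h
  | cons x xs ih =>
    by_cases hx : pvF x = true
    · have hxs : xs.all pvF = false := by simpa [hx] using h
      obtain ⟨h1, h2⟩ := ih hxs
      refine ⟨?_, ?_⟩
      · simp only [List.takeWhile_cons_of_pos hx, List.length_cons, List.length_cons]
        omega
      · simpa [List.takeWhile_cons_of_pos hx] using h2
    · refine ⟨?_, ?_⟩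
      · simp [List.takeWhile_cons_of_neg hx]
      · simp only [List.takeWhile_cons_of_neg hx, List.length_nil, List.getD_cons_zero]
        exact Bool.eq_false_iff.mpr hx


-- ===== VERDICT (by name: the statement is the Claim_ definition above) =====
theorem trim_slot_tokens_py_spec : Claim_equal_trim_slot_tokens_py := by
  intro t _
  unfold Spec_trim_slot_tokens_py trim_slot_tokens_py trim_slot_tokens_py_alt
  have hstart : pvTrimStartLoop t 0 t.length = (t.takeWhile pvF).length := by
    simpa using pvStartLoop_eq t 0
  dsimp only
  split
  case h_1 heq =>
    -- B's kept list is empty: everything is filler, both sides give []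
    have hk : pvKeepAux 0 t = [] := by rw [← pvKeep_eq t 0]; exact heq
    have hall : t.all pvF = true := (pvKeepAux_nil_iff t 0).mp hk
    have ha : (t.takeWhile pvF).length = t.length := by
      rw [List.takeWhile_eq_self_iff.mpr (List.all_eq_true.mp hall)]
    have hend : pvTrimEndLoop t t.length t.length = t.length := by
      rw [pvTrimEndLoop]
      simp
    rw [hstart, ha, hend, PySem.List.slice_natCast]
    simp
  case h_2 i rest heq =>
    -- B kept at least one index
    have hk : pvKeepAux 0 t = i :: rest := by rw [← pvKeep_eq t 0]; exact heq
    have hall' : t.all pvF = false := by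
      rcases Bool.eq_false_or_eq_true (t.all pvF) with h1 | h1
      · rw [(pvKeepAux_nil_iff t 0).mpr h1] at hk
        exact absurd hk (by simp)
      · exact h1
    obtain ⟨halt, hav⟩ := pvFirstNonF t hall'
    set a := (t.takeWhile pvF).length with hadef
    set q := (t.reverse.takeWhile pvF).length with hqdef
    have hq : q ≤ t.length := by
      have h3 := (List.takeWhile_prefix (l := t.reverse) (p := pvF)).length_le
      simpa using h3
    have hend : pvTrimEndLoop t t.length a = t.length - q := by
      rw [pvEndLoop_eq t t.length a halt le_rfl hav, List.take_length]
    have hhead := pvKeepAux_head t 0 hall'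
    rw [hk] at hhead
    simp only [List.head?_cons, Option.some.injEq] at hhead
    have hlast := pvKeepAux_getLast t 0 hall'
    rw [hk, List.getLast?_eq_some_getLast (by simp)] at hlast
    simp only [Option.some.injEq] at hlast
    rw [hstart, hend, hlast, hhead]
    congr 1
    · simp [hadef]
    · simp only [Option.some.injEq]
      rw [Nat.cast_sub hq]
      ring
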